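-- pv_equiv track=rewrite | github.com/fooziex/cs3420 | ai.py | pick_best_spot
-- ===== SOURCE A (Python) =====
-- def pick_best_spot(scoreboard):
--     #receives a list argument that returns the coordinates for the highest element in the list
--     max_score = 0
--     max_coords = (None,None)
--
--     for x in range(5):
--         for y in range(5):
--             if scoreboard[x][y] > max_score:
--                 max_score = scoreboard[x][y]
--                 max_coords = (x,y)
--
--     return max_coords
-- ===== SOURCE B (Python) =====
-- def pick_best_spot(scoreboard):
--     # two-pass: collect (value, x, y) triples in row-major order, take the max
--     # value, then locate its first occurrence; all values <= 0 -> (None, None)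
--     triples = [(scoreboard[x][y], x, y) for x in range(5) for y in range(5)]
--     best = max(v for v, _, _ in triples)
--     if best > 0:
--         for v, x, y in triples:
--             if v == best:
--                 return (x, y)
--     return (None, None)
-- ===== Notes on version B (the rewrite author's own statement) =====
-- stated objective: alternative
-- what changed: A's single interleaved scan that updates a running max and its coordinates is replaced by a two-pass decomposition: build the 25 (value,x,y) triples, compute the max with builtin max(), then locate its first row-major occurrence; the >0 gate and first-occurrence tie-break are preserved.
import Mathlib
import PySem

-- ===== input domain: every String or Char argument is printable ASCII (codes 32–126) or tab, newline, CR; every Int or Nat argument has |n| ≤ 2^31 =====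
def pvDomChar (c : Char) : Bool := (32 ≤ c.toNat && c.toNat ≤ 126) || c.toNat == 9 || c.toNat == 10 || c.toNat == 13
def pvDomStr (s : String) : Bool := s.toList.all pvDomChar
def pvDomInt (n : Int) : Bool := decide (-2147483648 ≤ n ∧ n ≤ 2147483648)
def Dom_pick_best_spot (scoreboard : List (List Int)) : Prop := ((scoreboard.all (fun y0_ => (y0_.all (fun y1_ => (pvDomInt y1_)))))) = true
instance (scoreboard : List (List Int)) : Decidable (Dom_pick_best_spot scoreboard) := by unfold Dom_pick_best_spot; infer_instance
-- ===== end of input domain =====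

-- B replaces A's single running-max scan by a two-pass decomposition (collect triples, max, locate): alternative, not faster.

-- scoreboard[x][y]; exact under Pre_ (both indexes in range, so pyGet? is some)
def pvCell (scoreboard : List (List Int)) (x y : Int) : Int :=
  (PySem.List.pyGet? ((PySem.List.pyGet? scoreboard x).getD []) y).getD 0

-- ===== PORT A =====
def pick_best_spot (scoreboard : List (List Int)) : Option Int × Option Int :=
  ((PySem.List.pyRange 0 5 1).foldl
    (fun st x => (PySem.List.pyRange 0 5 1).foldl
      (fun st y =>
        if pvCell scoreboard x y > st.1 then (pvCell scoreboard x y, (some x, some y)) else st)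
      st)
    ((0 : Int), ((none : Option Int), (none : Option Int)))).2

-- ===== PORT B =====
-- the row-major list comprehension of (value, x, y) triples
def pvTriples (scoreboard : List (List Int)) : List (Int × Int × Int) :=
  (PySem.List.pyRange 0 5 1).flatMap
    (fun x => (PySem.List.pyRange 0 5 1).map (fun y => (pvCell scoreboard x y, x, y)))

def pick_best_spot_alt (scoreboard : List (List Int)) : Option Int × Option Int :=
  let triples := pvTriples scoreboard
  let best := (PySem.List.max? (triples.map (fun t => t.1)) (fun v => v)).getD 0
  if best > 0 then
    match triples.find? (fun t => t.1 == best) with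
    | some t => (some t.2.1, some t.2.2)
    | none => (none, none)
  else (none, none)

-- ===== PRECONDITION & SPEC =====
-- Pre_: A indexes scoreboard[x][y] for all x,y in 0..4, so it raises IndexError unless
-- there are at least 5 rows and each of the first 5 rows has at least 5 entries.
def Pre_pick_best_spot (scoreboard : List (List Int)) : Prop :=
  5 ≤ scoreboard.length ∧ ∀ row ∈ scoreboard.take 5, 5 ≤ row.length
instance (scoreboard : List (List Int)) : Decidable (Pre_pick_best_spot scoreboard) := by
  unfold Pre_pick_best_spot; infer_instance
def pvWitness_pick_best_spot : List (List Int) :=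
  [[0,0,0,0,0],[0,0,0,0,0],[0,0,3,0,0],[0,0,0,0,0],[0,0,0,0,0]]
def Spec_pick_best_spot (scoreboard : List (List Int)) (out : Option Int × Option Int) : Prop := out = pick_best_spot_alt scoreboard
instance (scoreboard : List (List Int)) (out : Option Int × Option Int) : Decidable (Spec_pick_best_spot scoreboard out) := by unfold Spec_pick_best_spot; infer_instance

-- ===== CLAIM (what is proved, stated in full; the proofs are below) =====
def Claim_equal_pick_best_spot : Prop := ∀ (scoreboard : List (List Int)), Dom_pick_best_spot scoreboard → Pre_pick_best_spot scoreboard → Spec_pick_best_spot scoreboard (pick_best_spot scoreboard)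

-- ===== LEMMAS AND PROOFS =====

-- A's loop body, as a step over one (value, x, y) triple
def pvStep (st : Int × (Option Int × Option Int)) (t : Int × Int × Int) :
    Int × (Option Int × Option Int) :=
  if t.1 > st.1 then (t.1, (some t.2.1, some t.2.2)) else st

lemma pyRange5 : PySem.List.pyRange 0 5 1 = [0, 1, 2, 3, 4] := by decide

-- A's nested range loop IS the fold of pvStep over the triple list
lemma pickA_as_fold (scoreboard : List (List Int)) :
    pick_best_spot scoreboard
      = (List.foldl pvStep ((0 : Int), (none, none)) (pvTriples scoreboard)).2 := by
  simp only [pick_best_spot, pvTriples, List.foldl_flatMap, List.foldl_map, pvStep]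

-- a running max over a projection is the running max over the mapped list
lemma foldl_max_proj (L : List (Int × Int × Int)) (a : Int) :
    L.foldl (fun a t => max a t.1) a = (L.map (fun t => t.1)).foldl max a := by
  induction L generalizing a with
  | nil => rfl
  | cons t L ih => simp [ih]

-- characterisation of the running-max fold: final max is the fold of max, and the
-- coordinates are the first triple attaining it (or the start coords if none beats m)
lemma foldl_pvStep (L : List (Int × Int × Int)) (m : Int) (c : Option Int × Option Int) :
    List.foldl pvStep (m, c) L
      = (if L.foldl (fun a t => max a t.1) m > m then
           (L.foldl (fun a t => max a t.1) m,
            match L.find? (fun t => t.1 == L.foldl (fun a t => max a t.1) m) with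
            | some t => (some t.2.1, some t.2.2)
            | none => c)
         else (m, c)) := by
  induction L generalizing m c with
  | nil => simp
  | cons t L ih =>
    simp only [List.foldl_cons]
    by_cases h : t.1 > m
    · rw [show pvStep (m, c) t = (t.1, (some t.2.1, some t.2.2)) from by simp [pvStep, h]]
      rw [ih]
      have hmax : List.foldl (fun a t => max a t.1) (max m t.1) L
          = List.foldl (fun a t => max a t.1) t.1 L := by
        rw [max_eq_right (le_of_lt h)]
      simp only [hmax]
      set M := List.foldl (fun a t => max a t.1) t.1 L with hMdef
      have hle : t.1 ≤ M := (PySem.List.le_foldl_max_int L (fun t => t.1) t.1).1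
      by_cases h2 : M > t.1
      · have hne : (t.1 == M) = false := by simp; omega
        rw [if_pos h2, if_pos (lt_trans h h2)]
        rw [List.find?_cons_of_neg (by simp [hne])]
        have hmem : M ∈ L.map (fun t => t.1) := by
          have hm := PySem.List.foldl_max_mem (L.map (fun t => t.1)) t.1
          rw [← foldl_max_proj] at hm
          rcases hm with h' | h'
          · omega
          · exact h'
        obtain ⟨s, hs, hsv⟩ := List.mem_map.mp hmem
        cases hfind : List.find? (fun t => t.1 == M) L with
        | some s' => rfl
        | none =>
          exfalso
          have hnone := List.find?_eq_none.mp hfind s hs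
          simp [hsv] at hnone
      · have hMeq : M = t.1 := le_antisymm (not_lt.mp h2) hle
        rw [if_neg h2, if_pos (by omega : M > m)]
        rw [List.find?_cons_of_pos (by simp [hMeq])]
        simp [hMeq]
    · rw [show pvStep (m, c) t = (m, c) from by simp [pvStep, h]]
      rw [ih]
      have hmax : List.foldl (fun a t => max a t.1) (max m t.1) L
          = List.foldl (fun a t => max a t.1) m L := by
        rw [max_eq_left (not_lt.mp h)]
      simp only [hmax]
      set M := List.foldl (fun a t => max a t.1) m L with hMdef
      by_cases h2 : M > m
      · have hne : (t.1 == M) = false := by simp; omega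
        rw [if_pos h2, if_pos h2]
        rw [List.find?_cons_of_neg (by simp [hne])]
      · rw [if_neg h2, if_neg h2]

-- fold of max started at 0 is max 0 (python max of the values)
lemma foldl_max_from_zero (v : Int) (vs : List Int) :
    List.foldl max (0 : Int) (v :: vs) = max 0 (List.foldl max v vs) := by
  simpa using List.foldl_assoc (op := (max : Int → Int → Int)) (l := vs) (a₁ := 0) (a₂ := v)

theorem pick_best_spot_equal (scoreboard : List (List Int)) :
    pick_best_spot scoreboard = pick_best_spot_alt scoreboard := by
  rw [pickA_as_fold, foldl_pvStep]
  simp only [pick_best_spot_alt, foldl_max_proj]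
  cases hT : pvTriples scoreboard with
  | nil =>
    exfalso
    have := congrArg List.length hT
    simp [pvTriples, pyRange5] at this
  | cons t rest =>
    simp only [List.map_cons, foldl_max_from_zero, PySem.List.max?_id_cons, Option.getD_some]
    split_ifs with h1 h2 h2
    · rw [max_eq_right (le_of_lt h2)]
    · exact absurd ((lt_max_iff.mp h1).resolve_left (lt_irrefl 0)) h2
    · exact absurd (lt_of_lt_of_le h2 (le_max_right 0 _)) h1
    · rfl

-- ===== VERDICT (by name: the statement is the Claim_ definition above) =====
theorem pick_best_spot_spec : Claim_equal_pick_best_spot := by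
  intro sb _ _
  unfold Spec_pick_best_spot
  exact pick_best_spot_equal sb
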